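-- pv_equiv track=rewrite | github.com/ddobokki/KoTNT | utils/DatasetsGenerator.py | bracket_filter
-- ===== SOURCE A (Python) =====
-- def bracket_filter(sentence, mode="phonetic"):
--     new_sentence = str()
--
--     if mode == "phonetic":
--         flag = False
--
--         for ch in sentence:
--             if ch == "(" and flag is False:
--                 flag = True
--                 continue
--             if ch == "(" and flag is True:
--                 flag = False
--                 continue
--             if ch != ")" and flag is False:
--                 new_sentence += ch
--         if flag:
--             raise ValueError("Unsupported mode : {0}".format(sentence))
--
--     elif mode == "spelling":
--         flag = True
--
--         for ch in sentence:
--             if ch == "(":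
--                 continue
--             if ch == ")":
--                 if flag is True:
--                     flag = False
--                     continue
--                 else:
--                     flag = True
--                     continue
--             if ch != ")" and flag is True:
--                 new_sentence += ch
--
--     else:
--         raise ValueError("Unsupported mode : {0}".format(mode))
--
--     return new_sentence
-- ===== SOURCE B (Python) =====
-- def bracket_filter(sentence, mode="phonetic"):
--     if mode == "phonetic":
--         parts = sentence.split("(")
--         if len(parts) % 2 == 0:
--             raise ValueError("Unsupported mode : {0}".format(sentence))
--         return "".join(p.replace(")", "") for i, p in enumerate(parts) if i % 2 == 0)
--     if mode == "spelling":
--         parts = sentence.split(")")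
--         return "".join(p.replace("(", "") for i, p in enumerate(parts) if i % 2 == 0)
--     raise ValueError("Unsupported mode : {0}".format(mode))
-- ===== Notes on version B (the rewrite author's own statement) =====
-- stated objective: alternative
-- what changed: Replaces the character-by-character flag-toggling loop with split-on-the-toggling-bracket: keep the even-indexed parts, strip the other bracket from them and join.
import Mathlib
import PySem

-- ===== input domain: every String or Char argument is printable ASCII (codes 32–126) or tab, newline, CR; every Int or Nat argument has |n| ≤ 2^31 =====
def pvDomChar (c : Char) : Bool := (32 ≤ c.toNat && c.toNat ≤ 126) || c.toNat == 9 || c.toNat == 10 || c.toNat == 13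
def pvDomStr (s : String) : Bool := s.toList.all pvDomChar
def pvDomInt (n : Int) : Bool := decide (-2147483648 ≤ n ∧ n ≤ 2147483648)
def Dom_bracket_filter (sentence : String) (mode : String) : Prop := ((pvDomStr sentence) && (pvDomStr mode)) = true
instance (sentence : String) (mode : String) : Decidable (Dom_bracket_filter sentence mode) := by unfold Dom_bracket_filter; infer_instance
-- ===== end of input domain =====

-- B replaces A's character-by-character flag-toggling loop by split-on-the-toggling-bracket:
-- keep even-indexed parts, strip the other bracket, join (alternative decomposition, same cost).


-- ===== PORT A =====
-- the body of A's phonetic for-loop, branch for branch (the two '(' branches, then the keep branch)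
def pvPhonStep (st : Bool × List Char) (ch : Char) : Bool × List Char :=
  if ch = '(' ∧ st.1 = false then (true, st.2)
  else if ch = '(' ∧ st.1 = true then (false, st.2)
  else if ch ≠ ')' ∧ st.1 = false then (st.1, st.2 ++ [ch])
  else st

-- the body of A's spelling for-loop
def pvSpellStep (st : Bool × List Char) (ch : Char) : Bool × List Char :=
  if ch = '(' then st
  else if ch = ')' then (if st.1 = true then (false, st.2) else (true, st.2))
  else if ch ≠ ')' ∧ st.1 = true then (st.1, st.2 ++ [ch])
  else st

def bracket_filter (sentence : String) (mode : String) : String :=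
  if mode = "phonetic" then
    let st := sentence.toList.foldl pvPhonStep (false, [])
    -- Python raises ValueError here when st.1 = true; those inputs are excluded by Pre_
    String.mk st.2
  else if mode = "spelling" then
    String.mk (sentence.toList.foldl pvSpellStep (true, [])).2
  else
    ""  -- Python raises ValueError (unsupported mode); excluded by Pre_

-- ===== PORT B =====
def bracket_filter_alt (sentence : String) (mode : String) : String :=
  if mode = "phonetic" then
    let parts := PySem.Chars.splitOn sentence.toList ['(']
    if parts.length % 2 == 0 then ""  -- Python raises ValueError here; excluded by Pre_
    else String.mk (PySem.Chars.join []
      (((PySem.List.enumerate parts).filter (fun ip => PySem.Int.mod ip.1 2 == 0)).map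
        (fun ip => PySem.Chars.replace ip.2 [')'] [])))
  else if mode = "spelling" then
    let parts := PySem.Chars.splitOn sentence.toList [')']
    String.mk (PySem.Chars.join []
      (((PySem.List.enumerate parts).filter (fun ip => PySem.Int.mod ip.1 2 == 0)).map
        (fun ip => PySem.Chars.replace ip.2 ['('] [])))
  else
    ""  -- Python raises ValueError (unsupported mode); excluded by Pre_

-- ===== PRECONDITION & SPEC =====
-- Pre_ excludes exactly the inputs where A raises ValueError: an unsupported mode,
-- and phonetic mode with an odd number of '(' in the sentence.
def Pre_bracket_filter (sentence : String) (mode : String) : Prop :=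
  (mode = "phonetic" ∧ sentence.toList.count '(' % 2 = 0) ∨ mode = "spelling"
instance (sentence : String) (mode : String) : Decidable (Pre_bracket_filter sentence mode) := by
  unfold Pre_bracket_filter; infer_instance

def pvWitness_bracket_filter : String × String := ("ab(cd(e)f", "phonetic")

def Spec_bracket_filter (sentence : String) (mode : String) (out : String) : Prop := out = bracket_filter_alt sentence mode
instance (sentence : String) (mode : String) (out : String) : Decidable (Spec_bracket_filter sentence mode out) := by unfold Spec_bracket_filter; infer_instance

-- ===== CLAIM (what is proved, stated in full; the proofs are below) =====
def Claim_equal_bracket_filter : Prop := ∀ (sentence : String) (mode : String), Dom_bracket_filter sentence mode → Pre_bracket_filter sentence mode → Spec_bracket_filter sentence mode (bracket_filter sentence mode)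

-- ===== LEMMAS AND PROOFS =====

-- structural single-character split (proof-side model of Python's s.split(d))
def pvSplit1 (d : Char) : List Char → List (List Char)
  | [] => [[]]
  | c :: cs => if c = d then [] :: pvSplit1 d cs else (pvSplit1 d cs).modifyHead (c :: ·)

-- even-indexed (b = true) / odd-indexed (b = false) elements
def pvPick (b : Bool) : List (List Char) → List (List Char)
  | [] => []
  | x :: xs => if b then x :: pvPick false xs else pvPick true xs

lemma pvSplit1_ne_nil (d : Char) (cs : List Char) : pvSplit1 d cs ≠ [] := by
  cases cs with
  | nil => simp [pvSplit1]
  | cons c cs =>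
    simp only [pvSplit1]
    split_ifs
    · simp
    · cases h : pvSplit1 d cs with
      | nil => exact absurd h (pvSplit1_ne_nil d cs)
      | cons p ps => simp

lemma pvSplitOn_go_spec (d : Char) (l : List Char) :
    ∀ (fuel : Nat) (cur : List Char) (acc : List (List Char)), l.length < fuel →
      PySem.Chars.splitOn.go [d] fuel l cur acc
        = acc.reverse ++ (pvSplit1 d l).modifyHead (cur.reverse ++ ·) := by
  induction l with
  | nil =>
    intro fuel cur acc h
    match fuel with
    | fuel + 1 => simp [PySem.Chars.splitOn.go, pvSplit1]
  | cons c rest ih =>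
    intro fuel cur acc h
    match fuel with
    | fuel + 1 =>
      have hf : rest.length < fuel := by simpa using h
      simp only [PySem.Chars.splitOn.go]
      by_cases hc : c = d
      · have hp : List.isPrefixOf [d] (c :: rest) = true := by simp [List.isPrefixOf, hc]
        simp only [hp, if_pos, show [d].length = 1 from rfl, List.drop_one, List.tail_cons]
        rw [ih fuel [] (cur.reverse :: acc) hf]
        obtain ⟨p, ps, hps⟩ : ∃ p ps, pvSplit1 d rest = p :: ps := by
          cases h' : pvSplit1 d rest with
          | nil => exact absurd h' (pvSplit1_ne_nil d rest)
          | cons p ps => exact ⟨p, ps, rfl⟩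
        simp [pvSplit1, hc, hps, List.modifyHead]
      · have hp : List.isPrefixOf [d] (c :: rest) = false := by
          simp [List.isPrefixOf]
          exact fun h' => hc h'.symm
        rw [hp]
        simp only [Bool.false_eq_true, if_neg, not_false_iff]
        rw [ih fuel (c :: cur) acc hf]
        obtain ⟨p, ps, hps⟩ : ∃ p ps, pvSplit1 d rest = p :: ps := by
          cases h' : pvSplit1 d rest with
          | nil => exact absurd h' (pvSplit1_ne_nil d rest)
          | cons p ps => exact ⟨p, ps, rfl⟩
        simp [pvSplit1, hc, hps, List.modifyHead]

lemma pvSplitOn_eq (d : Char) (cs : List Char) :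
    PySem.Chars.splitOn cs [d] = pvSplit1 d cs := by
  rw [PySem.Chars.splitOn, pvSplitOn_go_spec d cs (cs.length + 1) [] [] (by omega)]
  obtain ⟨p, ps, hps⟩ : ∃ p ps, pvSplit1 d cs = p :: ps := by
    cases h' : pvSplit1 d cs with
    | nil => exact absurd h' (pvSplit1_ne_nil d cs)
    | cons p ps => exact ⟨p, ps, rfl⟩
  simp [hps, List.modifyHead]

lemma pvReplace_go_spec (d : Char) (l : List Char) :
    ∀ (fuel : Nat) (acc : List Char), l.length ≤ fuel →
      PySem.Chars.replace.go [d] [] fuel l acc = acc.reverse ++ l.filter (· ≠ d) := by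
  induction l with
  | nil =>
    intro fuel acc h
    match fuel with
    | 0 => simp [PySem.Chars.replace.go]
    | fuel + 1 => simp [PySem.Chars.replace.go]
  | cons c rest ih =>
    intro fuel acc h
    match fuel with
    | fuel + 1 =>
      have hf : rest.length ≤ fuel := by simpa using h
      simp only [PySem.Chars.replace.go]
      by_cases hc : c = d
      · have hp : List.isPrefixOf [d] (c :: rest) = true := by simp [List.isPrefixOf, hc]
        simp only [hp, if_pos, show [d].length = 1 from rfl, List.drop_one, List.tail_cons,
          List.reverse_nil, List.nil_append]
        rw [ih fuel acc hf]
        simp [hc]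
      · have hp : List.isPrefixOf [d] (c :: rest) = false := by
          simp [List.isPrefixOf]
          exact fun h' => hc h'.symm
        rw [hp]
        simp only [Bool.false_eq_true, if_neg, not_false_iff]
        rw [ih fuel (c :: acc) hf]
        simp [hc]

lemma pvReplace_eq (d : Char) (l : List Char) :
    PySem.Chars.replace l [d] [] = l.filter (· ≠ d) := by
  rw [PySem.Chars.replace]
  simp only [List.isEmpty_cons, Bool.false_eq_true, if_neg, not_false_iff]
  simpa using pvReplace_go_spec d l l.length [] le_rfl

lemma pvJoinNil_cons (x : List Char) (xs : List (List Char)) :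
    PySem.Chars.join [] (x :: xs) = x ++ PySem.Chars.join [] xs := by
  cases xs with
  | nil => simp [PySem.Chars.join, List.intercalate]
  | cons y ys => simp [PySem.Chars.join, List.intercalate]

-- A's phonetic loop computes: keep the even-indexed split parts (odd-indexed if flag starts true), ')' removed
lemma pvPhon_core (cs : List Char) :
    ∀ (flag : Bool) (acc : List Char),
      (cs.foldl pvPhonStep (flag, acc)).2
        = acc ++ PySem.Chars.join [] ((pvPick (!flag) (pvSplit1 '(' cs)).map (List.filter (· ≠ ')'))) := by
  induction cs with
  | nil =>
    intro flag acc
    cases flag <;> simp [pvPick, pvSplit1, PySem.Chars.join, List.intercalate]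
  | cons c cs ih =>
    intro flag acc
    by_cases hc : c = '('
    · subst hc
      cases flag
      · rw [List.foldl_cons, show pvPhonStep (false, acc) '(' = (true, acc) from by simp [pvPhonStep], ih true acc]
        simp [pvSplit1, pvPick, pvJoinNil_cons]
      · rw [List.foldl_cons, show pvPhonStep (true, acc) '(' = (false, acc) from by simp [pvPhonStep], ih false acc]
        simp [pvSplit1, pvPick]
    · obtain ⟨p, ps, hps⟩ : ∃ p ps, pvSplit1 '(' cs = p :: ps := by
        cases h' : pvSplit1 '(' cs with
        | nil => exact absurd h' (pvSplit1_ne_nil '(' cs)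
        | cons p ps => exact ⟨p, ps, rfl⟩
      cases flag
      · by_cases hr : c = ')'
        · subst hr
          rw [List.foldl_cons, show pvPhonStep (false, acc) ')' = (false, acc) from by simp [pvPhonStep], ih false acc]
          simp [pvSplit1, hps, List.modifyHead, pvPick, pvJoinNil_cons]
        · rw [List.foldl_cons, show pvPhonStep (false, acc) c = (false, acc ++ [c]) from by simp [pvPhonStep, hr, hc], ih false (acc ++ [c])]
          simp [pvSplit1, hc, hps, List.modifyHead, pvPick, pvJoinNil_cons, hr]
      · rw [List.foldl_cons, show pvPhonStep (true, acc) c = (true, acc) from by simp [pvPhonStep, hc], ih true acc]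
        simp [pvSplit1, hc, hps, List.modifyHead, pvPick]

lemma pvSpell_core (cs : List Char) :
    ∀ (flag : Bool) (acc : List Char),
      (cs.foldl pvSpellStep (flag, acc)).2
        = acc ++ PySem.Chars.join [] ((pvPick flag (pvSplit1 ')' cs)).map (List.filter (· ≠ '('))) := by
  induction cs with
  | nil =>
    intro flag acc
    cases flag <;> simp [pvPick, pvSplit1, PySem.Chars.join, List.intercalate]
  | cons c cs ih =>
    intro flag acc
    by_cases hr : c = ')'
    · subst hr
      cases flag
      · rw [List.foldl_cons, show pvSpellStep (false, acc) ')' = (true, acc) from by simp [pvSpellStep], ih true acc]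
        simp [pvSplit1, pvPick]
      · rw [List.foldl_cons, show pvSpellStep (true, acc) ')' = (false, acc) from by simp [pvSpellStep], ih false acc]
        simp [pvSplit1, pvPick, pvJoinNil_cons]
    · obtain ⟨p, ps, hps⟩ : ∃ p ps, pvSplit1 ')' cs = p :: ps := by
        cases h' : pvSplit1 ')' cs with
        | nil => exact absurd h' (pvSplit1_ne_nil ')' cs)
        | cons p ps => exact ⟨p, ps, rfl⟩
      by_cases hc : c = '('
      · subst hc
        cases flag
        · rw [List.foldl_cons, show pvSpellStep (false, acc) '(' = (false, acc) from by simp [pvSpellStep], ih false acc]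
          simp [pvSplit1, hr, hps, List.modifyHead, pvPick]
        · rw [List.foldl_cons, show pvSpellStep (true, acc) '(' = (true, acc) from by simp [pvSpellStep], ih true acc]
          simp [pvSplit1, hr, hps, List.modifyHead, pvPick, pvJoinNil_cons]
      · cases flag
        · rw [List.foldl_cons, show pvSpellStep (false, acc) c = (false, acc) from by simp [pvSpellStep, hc, hr], ih false acc]
          simp [pvSplit1, hr, hps, List.modifyHead, pvPick]
        · rw [List.foldl_cons, show pvSpellStep (true, acc) c = (true, acc ++ [c]) from by simp [pvSpellStep, hc, hr], ih true (acc ++ [c])]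
          simp [pvSplit1, hr, hc, hps, List.modifyHead, pvPick, pvJoinNil_cons]

lemma pvEnumFilter (f : List Char → List Char) (parts : List (List Char)) :
    ∀ (n : Int),
      ((PySem.List.enumerate parts n).filter (fun ip => PySem.Int.mod ip.1 2 == 0)).map (fun ip => f ip.2)
        = (pvPick (PySem.Int.mod n 2 == 0) parts).map f := by
  induction parts with
  | nil => intro n; simp [PySem.List.enumerate, pvPick]
  | cons x xs ih =>
    intro n
    rw [PySem.List.enumerate_cons]
    have h2 : PySem.Int.mod n 2 = n % 2 := PySem.Int.mod_eq_emod_of_pos (by norm_num)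
    have h2' : PySem.Int.mod (n + 1) 2 = (n + 1) % 2 := PySem.Int.mod_eq_emod_of_pos (by norm_num)
    rcases PySem.Int.mod_two_eq n with h | h
    · have hn1 : PySem.Int.mod (n + 1) 2 = 1 := by rw [h2'] ; rw [h2] at h; omega
      have hd : (2 : Int) ∣ n := by rw [h2] at h; omega
      simp only [List.filter_cons, h, pvPick]
      have ihs := ih (n + 1)
      rw [hn1] at ihs
      simp only [show ((1 : Int) == 0) = false from rfl] at ihs ⊢
      simp
      simpa using ihs
    · have hn1 : PySem.Int.mod (n + 1) 2 = 0 := by rw [h2'] ; rw [h2] at h; omega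
      have hd : ¬ (2 : Int) ∣ n := by rw [h2] at h; omega
      have ihs := ih (n + 1)
      rw [hn1] at ihs
      simp only [show ((0 : Int) == 0) = true from rfl] at ihs ⊢
      simp [hd, pvPick]
      simpa using ihs

lemma pvSplit1_length (d : Char) (cs : List Char) :
    (pvSplit1 d cs).length = cs.count d + 1 := by
  induction cs with
  | nil => simp [pvSplit1]
  | cons c cs ih =>
    simp only [pvSplit1]
    by_cases h : c = d
    · subst h; simp [ih]
    · simp [h, List.length_modifyHead, ih]

-- ===== VERDICT (by name: the statement is the Claim_ definition above) =====
theorem bracket_filter_spec : Claim_equal_bracket_filter := by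
  intro sentence mode _ hpre
  unfold Spec_bracket_filter
  rcases hpre with ⟨hm, hcount⟩ | hm
  · subst hm
    simp only [bracket_filter, bracket_filter_alt, reduceIte]
    rw [pvSplitOn_eq]
    have hguard : ((pvSplit1 '(' sentence.toList).length % 2 == 0) = false := by
      rw [pvSplit1_length]
      simp only [beq_eq_false_iff_ne, ne_eq]
      omega
    rw [hguard]
    simp only [Bool.false_eq_true, if_neg, not_false_iff]
    congr 1
    rw [pvPhon_core sentence.toList false []]
    simp only [List.nil_append, Bool.not_false]
    simp only [pvReplace_eq]
    rw [show (fun (ip : Int × List Char) => List.filter (fun x => decide (x ≠ ')')) ip.2)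
          = (fun ip => (fun p => List.filter (fun x => decide (x ≠ ')')) p) ip.2) from rfl,
        pvEnumFilter (List.filter (fun x => decide (x ≠ ')'))) (pvSplit1 '(' sentence.toList) 0]
    rw [show (PySem.Int.mod 0 2 == 0) = true from rfl]
  · subst hm
    simp only [bracket_filter, bracket_filter_alt,
      if_neg (show ¬ ("spelling" : String) = "phonetic" from by decide), reduceIte]
    rw [pvSplitOn_eq]
    congr 1
    rw [pvSpell_core sentence.toList true []]
    simp only [List.nil_append]
    simp only [pvReplace_eq]
    rw [show (fun (ip : Int × List Char) => List.filter (fun x => decide (x ≠ '(')) ip.2)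
          = (fun ip => (fun p => List.filter (fun x => decide (x ≠ '(')) p) ip.2) from rfl,
        pvEnumFilter (List.filter (fun x => decide (x ≠ '('))) (pvSplit1 ')' sentence.toList) 0]
    rw [show (PySem.Int.mod 0 2 == 0) = true from rfl]
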